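-- pv_equiv track=rewrite | github.com/zirpo/x2md | pdf2md.py | _detect_headings
-- ===== SOURCE A (Python) =====
-- def _detect_headings(text):
--     """
--     Detect headings in the PDF text.
--
--     Args:
--         text (str): Text to analyze
--
--     Returns:
--         str: Text with markdown heading markers
--     """
--     lines = text.split('\n')
--     processed_lines = []
--
--     for i, line in enumerate(lines):
--         stripped = line.strip()
--
--         # Skip empty lines
--         if not stripped:
--             processed_lines.append(line)
--             continue
--
--         # Simple heading detection heuristic
--         is_isolated = (i == 0 or not lines[i-1].strip()) and \
--                       (i == len(lines)-1 or not lines[i+1].strip())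
--
--         if (is_isolated and len(stripped) < 50 and
--             (not stripped[-1] in '.!?,;' or stripped[-1] == ':') and
--             stripped[0].isupper()):
--
--             # Determine heading level based on length
--             if len(stripped) < 20:
--                 processed_lines.append(f"## {stripped}")
--             else:
--                 processed_lines.append(f"### {stripped}")
--         else:
--             processed_lines.append(line)
--
--     return '\n'.join(processed_lines)
-- ===== SOURCE B (Python) =====
-- def _detect_headings(text):
--     """Two-stage: partition lines into blank lines and maximal non-blank runs,
--     then emit blocks; a heading candidate is exactly a run of length one."""
--     lines = text.split('\n')
--     # stage 1: blocks: (True, [line]) for a blank line, (False, run) for a maximal non-blank run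
--     blocks = []
--     i, n = 0, len(lines)
--     while i < n:
--         if lines[i].strip() == '':
--             blocks.append((True, [lines[i]]))
--             i += 1
--         else:
--             j = i
--             while j < n and lines[j].strip() != '':
--                 j += 1
--             blocks.append((False, lines[i:j]))
--             i = j
--     # stage 2: emit; only singleton runs can become headings
--     out = []
--     for blank, chunk in blocks:
--         if blank:
--             out.append(chunk[0])
--         elif len(chunk) == 1:
--             s = chunk[0].strip()
--             if len(s) < 50 and s[-1] not in '.!?,;' and s[0].isupper():
--                 out.append(('## ' if len(s) < 20 else '### ') + s)
--             else:
--                 out.append(chunk[0])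
--         else:
--             out.extend(chunk)
--     return '\n'.join(out)
-- ===== Notes on version B (the rewrite author's own statement) =====
-- stated objective: alternative
-- what changed: Replaced A's single indexed pass that probes lines[i-1]/lines[i+1] with boundary tests by a two-stage pipeline: first partition the lines into blank lines and maximal non-blank runs, then emit the blocks, applying the heading test exactly to runs of length one (a singleton run is precisely an isolated line); A's vacuous colon clause in the punctuation test is dropped (':' is not among the banned trailing characters).
import Mathlib
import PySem

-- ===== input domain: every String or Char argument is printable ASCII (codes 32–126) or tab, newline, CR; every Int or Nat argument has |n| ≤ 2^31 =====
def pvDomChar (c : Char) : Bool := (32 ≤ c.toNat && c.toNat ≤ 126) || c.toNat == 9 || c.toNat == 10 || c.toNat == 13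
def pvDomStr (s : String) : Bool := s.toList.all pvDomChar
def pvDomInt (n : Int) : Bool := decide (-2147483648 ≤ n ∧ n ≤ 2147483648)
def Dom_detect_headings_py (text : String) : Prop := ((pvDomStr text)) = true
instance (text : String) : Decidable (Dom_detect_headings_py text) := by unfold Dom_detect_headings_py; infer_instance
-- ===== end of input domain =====

-- B replaces A's single indexed pass probing lines[i-1]/lines[i+1] by two stages: first
-- partition the lines into blank lines and maximal non-blank runs, then emit the blocks,
-- a heading candidate being exactly a run of length one; same output, proved equal.

-- ===== PORT A =====
-- A's loop body (the i-th iteration), kept as a helper; 'lines[i-1]'/'lines[i+1]' are only read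
-- under the guards i != 0 / i != len-1, so the .getD default is never the value used.
def pvBodyA (lines : List String) (i : Int) (line : String) : String :=
  let stripped := PySem.Str.strip line
  if stripped == "" then line
  else
    let isolated :=
      (i == 0 || PySem.Str.strip ((PySem.List.pyGet? lines (i - 1)).getD "") == "") &&
      (i == (lines.length : Int) - 1 || PySem.Str.strip ((PySem.List.pyGet? lines (i + 1)).getD "") == "")
    if isolated && decide (PySem.Str.len stripped < 50) &&
       (!(PySem.Str.isIn (String.singleton ((PySem.Str.pyGet? stripped (-1)).getD ' ')) ".!?,;") ||
        ((PySem.Str.pyGet? stripped (-1)).getD ' ' == ':')) &&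
       PySem.Chars.isupper ((PySem.Str.pyGet? stripped 0).getD ' ')
    then
      if PySem.Str.len stripped < 20 then "## " ++ stripped else "### " ++ stripped
    else line

def detect_headings_py (text : String) : String :=
  let lines := (PySem.Str.split? text "\n").getD []
  let processed := (PySem.List.enumerate lines 0).foldl
    (fun acc p => acc ++ [pvBodyA lines p.1 p.2]) []
  PySem.Str.join "\n" processed

-- ===== PORT B =====
-- a block of Source B's stage 1: a single blank line, or a maximal run of non-blank lines
inductive PvBlock : Type
  | blank : String → PvBlock
  | run : List String → PvBlock
deriving DecidableEq, Repr

-- stage 1 (Source B's outer while with the inner run-consuming while j: the inner while is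
-- exactly takeWhile/dropWhile on the non-blank predicate)
def pvGroup : List String → List PvBlock
  | [] => []
  | l :: rest =>
    if PySem.Str.strip l == "" then
      PvBlock.blank l :: pvGroup rest
    else
      PvBlock.run (l :: rest.takeWhile (fun x => !(PySem.Str.strip x == ""))) ::
        pvGroup (rest.dropWhile (fun x => !(PySem.Str.strip x == "")))
  termination_by ls => ls.length
  decreasing_by
    · simp
    · have := List.length_dropWhile_le (fun x => !(PySem.Str.strip x == "")) rest
      simp; omega

-- Source B's heading test on a singleton run's line
def pvHeadline (line : String) : String :=
  let s := PySem.Str.strip line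
  if decide (PySem.Str.len s < 50) &&
     !(PySem.Str.isIn (String.singleton ((PySem.Str.pyGet? s (-1)).getD ' ')) ".!?,;") &&
     PySem.Chars.isupper ((PySem.Str.pyGet? s 0).getD ' ')
  then (if PySem.Str.len s < 20 then "## " else "### ") ++ s
  else line

-- stage 2 (Source B's emission loop over the blocks)
def pvEmit : List PvBlock → List String
  | [] => []
  | PvBlock.blank l :: bs => l :: pvEmit bs
  | PvBlock.run r :: bs =>
      (if r.length == 1 then [pvHeadline (r.headD "")] else r) ++ pvEmit bs

def detect_headings_py_alt (text : String) : String :=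
  let lines := (PySem.Str.split? text "\n").getD []
  PySem.Str.join "\n" (pvEmit (pvGroup lines))

-- ===== PRECONDITION & SPEC =====
def Spec_detect_headings_py (text : String) (out : String) : Prop := out = detect_headings_py_alt text
instance (text : String) (out : String) : Decidable (Spec_detect_headings_py text out) := by unfold Spec_detect_headings_py; infer_instance

-- ===== CLAIM (what is proved, stated in full; the proofs are below) =====
def Claim_equal_detect_headings_py : Prop := ∀ (text : String), Dom_detect_headings_py text → Spec_detect_headings_py text (detect_headings_py text)

-- ===== LEMMAS AND PROOFS =====

-- proof-side normal form: A's i-th output depends only on the carried previous-blank flag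
-- and the next line (sentinel "" at the end)
def pvMarkB (prevBlank : Bool) (line nxt : String) : String :=
  let s := PySem.Str.strip line
  if (s != "") && prevBlank && (PySem.Str.strip nxt == "") && decide (PySem.Str.len s < 50) &&
     !(PySem.Str.isIn (String.singleton ((PySem.Str.pyGet? s (-1)).getD ' ')) ".!?,;") &&
     PySem.Chars.isupper ((PySem.Str.pyGet? s 0).getD ' ')
  then (if PySem.Str.len s < 20 then "## " else "### ") ++ s
  else line

-- the whole output list in that normal form, recursing over the lines
def pvGL (prev : Bool) : List String → List String
  | [] => []
  | l :: rest => pvMarkB prev l (rest.headD "") :: pvGL (PySem.Str.strip l == "") rest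

-- previous-blank flag after consuming 'pre'
def pvPrevBlank (pre : List String) : Bool :=
  match pre.getLast? with
  | none => true
  | some l => PySem.Str.strip l == ""

-- the redundant "or stripped[-1] == ':'" clause of A collapses: ':' is not in '.!?,;'
theorem pvColon (c : Char) :
    (!(PySem.Str.isIn (String.singleton c) ".!?,;") || (c == ':'))
      = !(PySem.Str.isIn (String.singleton c) ".!?,;") := by
  by_cases h : c = ':'
  · subst h; decide
  · simp [h]

theorem pvHead_eq (pre rest : List String) (l : String) :
    pvBodyA (pre ++ l :: rest) (pre.length : Int) l
      = pvMarkB (pvPrevBlank pre) l (rest.headD "") := by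
  unfold pvBodyA pvMarkB
  by_cases hs : PySem.Str.strip l == ""
  · have hs' : PySem.Str.strip l = "" := by simpa using hs
    simp [hs']
  · have hs' : ¬ PySem.Str.strip l = "" := by simpa using hs
    simp only [hs, Bool.false_eq_true, if_false]
    rw [pvColon]
    have hprev : ((pre.length : Int) == 0 ||
        PySem.Str.strip ((PySem.List.pyGet? (pre ++ l :: rest) ((pre.length : Int) - 1)).getD "") == "")
        = pvPrevBlank pre := by
      cases hp : pre.getLast? with
      | none =>
        have : pre = [] := List.getLast?_eq_none_iff.mp hp
        subst this; simp [pvPrevBlank, hp]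
      | some x =>
        have hne : pre ≠ [] := by
          intro h; subst h; simp at hp
        have hlen : 0 < pre.length := List.length_pos_iff.mpr hne
        have hcast : (pre.length : Int) - 1 = ((pre.length - 1 : Nat) : Int) := by omega
        have hget : (pre ++ l :: rest)[pre.length - 1]? = some x := by
          rw [List.getElem?_append_left (by omega)]
          rw [← List.getLast?_eq_getElem?]; exact hp
        rw [hcast, PySem.List.pyGet?_natCast, hget]
        simp [pvPrevBlank, hp, hne]
    have hnext : ((pre.length : Int) == ((pre ++ l :: rest).length : Int) - 1 ||
        PySem.Str.strip ((PySem.List.pyGet? (pre ++ l :: rest) ((pre.length : Int) + 1)).getD "") == "")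
        = (PySem.Str.strip (rest.headD "") == "") := by
      cases rest with
      | nil =>
        have : PySem.Str.strip "" = "" := by decide
        simp [this]
      | cons r rs =>
        have hget : (pre ++ l :: r :: rs)[pre.length + 1]? = some r := by
          rw [List.getElem?_append_right (by omega)]
          simp
        have hcast : (pre.length : Int) + 1 = ((pre.length + 1 : Nat) : Int) := by omega
        have hne2 : ((pre.length : Int) == ((pre ++ l :: r :: rs).length : Int) - 1) = false := by
          simp; omega
        rw [hcast, PySem.List.pyGet?_natCast, hget, hne2]
        simp
    rw [hprev, hnext]
    by_cases h1 : pvPrevBlank pre = true <;>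
      by_cases h2 : (PySem.Str.strip (rest.headD "") == "") = true <;>
        simp [h1, hs'] <;> split_ifs <;> rfl

-- A's map over enumerate equals the normal form pvGL
theorem pvMainA (rest pre : List String) :
    ((PySem.List.enumerate rest (pre.length : Int)).map
        (fun p => pvBodyA (pre ++ rest) p.1 p.2))
      = pvGL (pvPrevBlank pre) rest := by
  induction rest generalizing pre with
  | nil => simp [pvGL, PySem.List.enumerate]
  | cons l rest ih =>
    rw [PySem.List.enumerate_cons, pvGL]
    have hlen : (pre.length : Int) + 1 = ((pre ++ [l]).length : Nat) := by simp
    have happ : pre ++ l :: rest = (pre ++ [l]) ++ rest := by simp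
    have hpb : pvPrevBlank (pre ++ [l]) = (PySem.Str.strip l == "") := by
      simp [pvPrevBlank]
    simp only [List.map_cons]
    rw [pvHead_eq]
    congr 1
    rw [hlen, happ, ih (pre ++ [l]), hpb]

-- the flag is irrelevant when the next line is blank (or the list ends)
theorem pvGL_indep (ls : List String) (p q : Bool)
    (h : ls = [] ∨ PySem.Str.strip (ls.headD "") = "") :
    pvGL p ls = pvGL q ls := by
  cases ls with
  | nil => rfl
  | cons l rest =>
    have hb : PySem.Str.strip l = "" := by
      rcases h with h | h
      · simp at h
      · simpa using h
    simp [pvGL, pvMarkB, hb]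

-- inside a run with the flag down, every line passes through unchanged
theorem pvGL_run (r rest' : List String)
    (hr : ∀ x ∈ r, ¬ PySem.Str.strip x = "")
    (hrest : rest' = [] ∨ PySem.Str.strip (rest'.headD "") = "") :
    pvGL false (r ++ rest') = r ++ pvGL true rest' := by
  induction r with
  | nil => exact pvGL_indep _ _ _ hrest
  | cons x r ih =>
    have hx : ¬ PySem.Str.strip x = "" := hr x (by simp)
    have hx' : (PySem.Str.strip x == "") = false := by simpa using hx
    simp only [List.cons_append, pvGL, hx']
    rw [ih (fun z hz => hr z (by simp [hz]))]
    simp [pvMarkB]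

-- the head of dropWhile-nonblank is blank (or the list ends)
theorem pvDropHead (rest : List String) :
    rest.dropWhile (fun x => !(PySem.Str.strip x == "")) = [] ∨
      PySem.Str.strip ((rest.dropWhile (fun x => !(PySem.Str.strip x == ""))).headD "") = "" := by
  induction rest with
  | nil => exact Or.inl rfl
  | cons x xs ih =>
    by_cases hx : (PySem.Str.strip x == "") = true
    · right
      rw [List.dropWhile_cons_of_neg (by simp [hx])]
      simpa using hx
    · rw [List.dropWhile_cons_of_pos (by simpa using hx)]
      exact ih

-- the singleton-run heading test equals the normal-form mark with both neighbours blank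
theorem pvHeadline_eq (l nxt : String)
    (hl : ¬ PySem.Str.strip l = "") (hn : PySem.Str.strip nxt = "") :
    pvMarkB true l nxt = pvHeadline l := by
  have hl' : (PySem.Str.strip l != "") = true := by simpa using hl
  have hn' : (PySem.Str.strip nxt == "") = true := by simpa using hn
  simp only [pvMarkB, pvHeadline, hl', hn', Bool.true_and, Bool.and_true]

-- B's two stages reproduce the normal form
theorem pvMainB (ls : List String) : pvEmit (pvGroup ls) = pvGL true ls := by
  induction ls using pvGroup.induct with
  | case1 => simp [pvGroup, pvEmit, pvGL]
  | case2 l rest hb ih =>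
    have hb' : PySem.Str.strip l = "" := by simpa using hb
    simp [pvGroup, pvEmit, pvGL, ih, pvMarkB, hb']
  | case3 l rest hb ih =>
    have hb' : (PySem.Str.strip l == "") = false := by simpa using hb
    have ht : ∀ x ∈ rest.takeWhile (fun x => !(PySem.Str.strip x == "")),
        ¬ PySem.Str.strip x = "" := by
      intro x hx
      have := List.mem_takeWhile_imp hx
      simpa using this
    have hd := pvDropHead rest
    have hsplit : rest = rest.takeWhile (fun x => !(PySem.Str.strip x == "")) ++
        rest.dropWhile (fun x => !(PySem.Str.strip x == "")) :=
      (List.takeWhile_append_dropWhile).symm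
    simp only [pvGroup, hb', Bool.false_eq_true, if_false, pvEmit, pvGL, ih]
    cases htw : rest.takeWhile (fun x => !(PySem.Str.strip x == "")) with
    | nil =>
      -- singleton run: rest starts blank (or is empty)
      have hrest : rest = rest.dropWhile (fun x => !(PySem.Str.strip x == "")) := by
        conv_lhs => rw [hsplit]
        rw [htw]; rfl
      have hrb : rest = [] ∨ PySem.Str.strip (rest.headD "") = "" := by
        rw [hrest]; exact hd
      have hnb : PySem.Str.strip (rest.headD "") = "" := by
        rcases hrb with h | h
        · subst h; decide
        · exact h
      rw [pvHeadline_eq l (rest.headD "") (by simpa using hb') hnb]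
      simp only [List.length_cons, List.length_nil, List.headD_cons]
      rw [← hrest, pvGL_indep rest false true hrb]
      simp
    | cons y t' =>
      -- run of length ≥ 2: the first line's successor y is non-blank
      have hy : ¬ PySem.Str.strip y = "" := ht y (by rw [htw]; simp)
      have hhead : rest.headD "" = y := by
        cases rest with
        | nil => simp at htw
        | cons a as =>
          by_cases ha : (PySem.Str.strip a == "") = true
          · rw [List.takeWhile_cons_of_neg (by simp [ha])] at htw; simp at htw
          · rw [List.takeWhile_cons_of_pos (by simpa using ha)] at htw
            simp at htw ⊢
            exact htw.1
      have hmark : pvMarkB true l (rest.headD "") = l := by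
        rw [hhead]
        have : (PySem.Str.strip y == "") = false := by simpa using hy
        simp [pvMarkB, this]
      have hlen : ((l :: y :: t').length == 1) = false := by simp
      rw [hmark, hlen]
      simp only [Bool.false_eq_true, if_false, List.cons_append]
      congr 1
      conv_rhs => rw [hsplit]
      rw [htw]
      exact (pvGL_run (y :: t') _ (by rw [← htw]; exact ht) hd).symm

-- ===== VERDICT (by name: the statement is the Claim_ definition above) =====
theorem detect_headings_py_spec : Claim_equal_detect_headings_py := by
  intro text _
  unfold Spec_detect_headings_py detect_headings_py detect_headings_py_alt
  simp only []
  generalize (PySem.Str.split? text "\n").getD [] = lines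
  rw [PySem.List.foldl_append_singleton_eq_map]
  have hA := pvMainA lines []
  simp only [List.length_nil, Nat.cast_zero, List.nil_append] at hA
  rw [hA, pvMainB]
  simp [pvPrevBlank]
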